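-- pv_equiv track=rewrite | github.com/ankit-agarwal-xx/image-processing | peri-area.py | find_perimeter_area
-- ===== SOURCE A (Python) =====
-- def find_perimeter_area(binary_image, width):
--     # Assuming binary_image is a 1D array representing a binary image
--     perimeter = 0
--     area = 0
--
--     # Iterate through each pixel in the binary image
--     for i in range(len(binary_image)):
--         if binary_image[i] == 1:
--             area += 1
--             # Check neighboring pixels to find perimeter
--             if i % width != 0 and binary_image[i - 1] == 0:
--                 perimeter += 1
--             if (i + 1) % width != 0 and binary_image[i + 1] == 0:
--                 perimeter += 1
--             if i >= width and binary_image[i - width] == 0: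
--                 perimeter += 1
--             if i + width < len(binary_image) and binary_image[i + width] == 0:
--                 perimeter += 1
--
--     return perimeter, area
--
-- width = 100  # Replace this with the actual width of your image
-- ===== SOURCE B (Python) =====
-- def find_perimeter_area(binary_image, width):
--     # area: one pass counting foreground pixels
--     area = 0
--     for p in binary_image:
--         if p == 1:
--             area += 1
--     # perimeter: scan adjacent pairs instead of the 4 neighbours of each pixel.
--     # A horizontal pair (i, i+1) inside one row, or a vertical pair (i, i+width),
--     # contributes one boundary edge exactly when one element is 1 and the other 0.
--     perimeter = 0
--     for i, (x, y) in enumerate(zip(binary_image, binary_image[1:])):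
--         if (i + 1) % width != 0 and ((x == 1 and y == 0) or (x == 0 and y == 1)):
--             perimeter += 1
--     for x, y in zip(binary_image, binary_image[width:]):
--         if (x == 1 and y == 0) or (x == 0 and y == 1):
--             perimeter += 1
--     return perimeter, area
-- ===== Notes on version B (the rewrite author's own statement) =====
-- stated objective: alternative
-- what changed: B computes the area in one pass over the pixel values and the perimeter by scanning adjacent PAIRS (zip of the image with its shift by 1 for horizontal edges within a row, and by width for vertical edges), counting each 1/0 boundary edge once from the pair, instead of A's per-pixel inspection of up to four neighbours via index arithmetic.
-- outside the precondition, e.g. on find_perimeter_area([0, 0], 0): A returns (0, 0), B raises ZeroDivisionError; on find_perimeter_area([0, 1, 0], -1): A returns (2, 1), B returns (0, 1)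
import Mathlib
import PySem

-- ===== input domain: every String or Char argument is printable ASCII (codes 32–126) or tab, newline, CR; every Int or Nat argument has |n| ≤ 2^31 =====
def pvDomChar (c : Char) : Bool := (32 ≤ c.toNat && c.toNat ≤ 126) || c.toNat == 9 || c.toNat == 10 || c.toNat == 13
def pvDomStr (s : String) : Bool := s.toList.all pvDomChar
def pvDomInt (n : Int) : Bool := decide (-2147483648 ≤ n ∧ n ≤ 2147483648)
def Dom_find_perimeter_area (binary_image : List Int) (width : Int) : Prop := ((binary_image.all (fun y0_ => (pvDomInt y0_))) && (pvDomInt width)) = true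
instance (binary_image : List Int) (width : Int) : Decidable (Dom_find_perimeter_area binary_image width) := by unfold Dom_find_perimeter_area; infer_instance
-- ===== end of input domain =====

-- B replaces A's per-pixel four-neighbour checks by an area-counting pass plus two
-- adjacent-pair scans (zip of the image with its shift by 1 and by width); alternative decomposition, same cost.


-- ===== PORT A =====
def find_perimeter_area (binary_image : List Int) (width : Int) : Int × Int :=
  (PySem.List.pyRange 0 (PySem.List.len binary_image) 1).foldl
    (fun st i =>
      if PySem.List.pyGet? binary_image i = some 1 then
        let area := st.2 + 1
        let per1 := if PySem.Int.mod i width ≠ 0 ∧ PySem.List.pyGet? binary_image (i - 1) = some 0 then st.1 + 1 else st.1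
        let per2 := if PySem.Int.mod (i + 1) width ≠ 0 ∧ PySem.List.pyGet? binary_image (i + 1) = some 0 then per1 + 1 else per1
        let per3 := if width ≤ i ∧ PySem.List.pyGet? binary_image (i - width) = some 0 then per2 + 1 else per2
        let per4 := if i + width < PySem.List.len binary_image ∧ PySem.List.pyGet? binary_image (i + width) = some 0 then per3 + 1 else per3
        (per4, area)
      else st)
    (0, 0)

-- ===== PORT B =====
def find_perimeter_area_alt (binary_image : List Int) (width : Int) : Int × Int :=
  let area := binary_image.foldl (fun a p => if p = 1 then a + 1 else a) 0
  let per := (PySem.List.enumerate (binary_image.zip (PySem.List.slice binary_image (some 1) none))).foldl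
    (fun per e =>
      if PySem.Int.mod (e.1 + 1) width ≠ 0 ∧
         ((e.2.1 = 1 ∧ e.2.2 = 0) ∨ (e.2.1 = 0 ∧ e.2.2 = 1)) then per + 1 else per) 0
  let per := (binary_image.zip (PySem.List.slice binary_image (some width) none)).foldl
    (fun per e => if (e.1 = 1 ∧ e.2 = 0) ∨ (e.1 = 0 ∧ e.2 = 1) then per + 1 else per) per
  (per, area)

-- ===== PRECONDITION & SPEC =====
-- Pre_ excludes non-positive width (outside the natural domain: there A raises ZeroDivisionError on
-- width 0 whenever some pixel is 1, and on negative width reads neighbours through Python's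
-- negative-index wraparound) and images whose last pixel is 1 while the length is not a
-- multiple of width (there A raises IndexError on binary_image[i + 1]).
def Pre_find_perimeter_area (binary_image : List Int) (width : Int) : Prop :=
  1 ≤ width ∧
    (PySem.Int.mod (PySem.List.len binary_image) width = 0 ∨ binary_image.getLast? ≠ some 1)
instance (binary_image : List Int) (width : Int) : Decidable (Pre_find_perimeter_area binary_image width) := by unfold Pre_find_perimeter_area; infer_instance
def pvWitness_find_perimeter_area : List Int × Int := ([1, 0, 0, 1], 2)

def Spec_find_perimeter_area (binary_image : List Int) (width : Int) (out : Int × Int) : Prop := out = find_perimeter_area_alt binary_image width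
instance (binary_image : List Int) (width : Int) (out : Int × Int) : Decidable (Spec_find_perimeter_area binary_image width out) := by unfold Spec_find_perimeter_area; infer_instance

-- ===== CLAIM (what is proved, stated in full; the proofs are below) =====
def Claim_equal_find_perimeter_area : Prop := ∀ (binary_image : List Int) (width : Int), Dom_find_perimeter_area binary_image width → Pre_find_perimeter_area binary_image width → Spec_find_perimeter_area binary_image width (find_perimeter_area binary_image width)

-- ===== LEMMAS AND PROOFS =====

def pvS (m : Nat) (f : Nat → Int) : Int := ((List.range m).map f).sum
theorem pvS_succ_left (m : Nat) (f : Nat → Int) : pvS (m + 1) f = f 0 + pvS m (fun k => f (k + 1)) := by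
  simp [pvS, List.range_succ_eq_map, List.map_map, Function.comp_def]
theorem pvS_succ_right (m : Nat) (f : Nat → Int) : pvS (m + 1) f = pvS m f + f m := by
  simp [pvS, List.range_succ]
theorem pvS_congr (m : Nat) (f g : Nat → Int) (h : ∀ k, k < m → f k = g k) : pvS m f = pvS m g := by
  unfold pvS
  rw [List.map_congr_left (fun x hx => h x (List.mem_range.mp hx))]
theorem pvS_add (m : Nat) (f g : Nat → Int) : pvS m (fun k => f k + g k) = pvS m f + pvS m g := by
  induction m with
  | zero => rfl
  | succ n ih => rw [pvS_succ_right, pvS_succ_right, pvS_succ_right, ih]; ring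
theorem pvS_split (m n : Nat) (h : m ≤ n) (f : Nat → Int) : pvS n f = pvS m f + pvS (n - m) (fun j => f (m + j)) := by
  unfold pvS
  rw [show n = m + (n - m) by omega, List.range_add]
  simp [List.map_map, Function.comp_def]
theorem pvS_zero_of_all (m : Nat) (f : Nat → Int) (h : ∀ k, k < m → f k = 0) : pvS m f = 0 := by
  rw [pvS_congr m f (fun _ => 0) h]; simp [pvS]

-- per-index contributions of A
def pvFA (b : List Int) (w : Int) (k : Nat) : Int :=
  if PySem.List.pyGet? b (k : Int) = some 1 then
    (if PySem.Int.mod (k : Int) w ≠ 0 ∧ PySem.List.pyGet? b ((k : Int) - 1) = some 0 then 1 else 0)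
    + (if PySem.Int.mod ((k : Int) + 1) w ≠ 0 ∧ PySem.List.pyGet? b ((k : Int) + 1) = some 0 then 1 else 0)
    + (if w ≤ (k : Int) ∧ PySem.List.pyGet? b ((k : Int) - w) = some 0 then 1 else 0)
    + (if (k : Int) + w < (b.length : Int) ∧ PySem.List.pyGet? b ((k : Int) + w) = some 0 then 1 else 0)
  else 0

def pvGA (b : List Int) (k : Nat) : Int := if PySem.List.pyGet? b (k : Int) = some 1 then 1 else 0

theorem pv_foldl_pair_add {α : Type} (l : List α) (F : Int × Int → α → Int × Int)
    (f g : α → Int) (h : ∀ st x, F st x = (st.1 + f x, st.2 + g x)) (a b : Int) :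
    l.foldl F (a, b) = (a + (l.map f).sum, b + (l.map g).sum) := by
  have hF : F = fun st x => (st.1 + f x, st.2 + g x) := by funext st x; exact h st x
  subst hF
  rw [PySem.List.foldl_prod_mk (f := fun acc x => acc + f x) (g := fun acc x => acc + g x)]
  rw [PySem.List.foldl_add, PySem.List.foldl_add]

theorem pvA_eq (b : List Int) (w : Int) :
    find_perimeter_area b w = (pvS b.length (pvFA b w), pvS b.length (pvGA b)) := by
  unfold find_perimeter_area
  rw [PySem.List.len_eq, PySem.List.pyRange_zero_nat, List.foldl_map]
  rw [pv_foldl_pair_add _ _ (pvFA b w) (pvGA b) ?_ 0 0]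
  · simp [pvS]
  · intro st k
    simp only [pvFA, pvGA]
    split_ifs <;> (simp; try ring)

def pvHB (b : List Int) (w : Int) (j : Nat) : Int :=
  if ((j : Int) + 1) % w ≠ 0 ∧
     ((b.getD j 0 = 1 ∧ b.getD (j + 1) 0 = 0) ∨ (b.getD j 0 = 0 ∧ b.getD (j + 1) 0 = 1)) then 1 else 0

def pvVB (b : List Int) (wn : Nat) (j : Nat) : Int :=
  if (b.getD j 0 = 1 ∧ b.getD (j + wn) 0 = 0) ∨ (b.getD j 0 = 0 ∧ b.getD (j + wn) 0 = 1) then 1 else 0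

theorem pv_zip_drop (b : List Int) (m : Nat) :
    b.zip (b.drop m) = (List.range (b.length - m)).map (fun j => (b.getD j 0, b.getD (j + m) 0)) := by
  apply List.ext_getElem
  · simp [List.length_zip]
  · intro k h1 h2
    simp only [List.length_zip, List.length_drop] at h1
    have hk : m + k < b.length := by omega
    simp only [List.getElem_zip, List.getElem_map, List.getElem_range, List.getElem_drop]
    rw [Nat.add_comm k m]
    rw [List.getD_eq_getElem b 0 (by omega : k < b.length), List.getD_eq_getElem b 0 hk]

theorem pv_enum_map_range {α : Type} (m : Nat) (f : Nat → α) :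
    PySem.List.enumerate ((List.range m).map f) 0 = (List.range m).map (fun k : Nat => ((k : Int), f k)) := by
  apply List.ext_getElem
  · simp [PySem.List.length_enumerate]
  · intro k h1 h2
    rw [PySem.List.getElem_enumerate]
    simp

theorem pvB_eq (b : List Int) (w : Int) (hw : 1 ≤ w) :
    find_perimeter_area_alt b w =
      (pvS (b.length - 1) (pvHB b w) + pvS (b.length - w.toNat) (pvVB b w.toNat),
       (b.map (fun p => if p = 1 then (1 : Int) else 0)).sum) := by
  have harea : List.foldl (fun (a : Int) p => if p = 1 then a + 1 else a) 0 b
      = (b.map (fun p => if p = 1 then (1 : Int) else 0)).sum := by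
    have hpt : ∀ (acc : Int), ∀ x ∈ b,
        (if x = 1 then acc + 1 else acc) = acc + if x = 1 then (1 : Int) else 0 := by
      intro acc x _
      split_ifs <;> ring
    rw [PySem.List.foldl_congr_mem b _ _ 0 hpt, PySem.List.foldl_add]
    ring
  have hhor : List.foldl
      (fun (per : Int) (e : Int × Int × Int) =>
        if PySem.Int.mod (e.1 + 1) w ≠ 0 ∧
           (e.2.1 = 1 ∧ e.2.2 = 0 ∨ e.2.1 = 0 ∧ e.2.2 = 1) then per + 1 else per) 0
      ((List.range (b.length - 1)).map (fun k : Nat => ((k : Int), (b.getD k 0, b.getD (k + 1) 0))))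
      = pvS (b.length - 1) (pvHB b w) := by
    rw [List.foldl_map]
    have hpt : ∀ (acc : Int), ∀ k ∈ List.range (b.length - 1),
        (if PySem.Int.mod (((k : Nat) : Int) + 1) w ≠ 0 ∧
            (b.getD k 0 = 1 ∧ b.getD (k + 1) 0 = 0 ∨ b.getD k 0 = 0 ∧ b.getD (k + 1) 0 = 1)
         then acc + 1 else acc) = acc + pvHB b w k := by
      intro acc k _
      rw [PySem.Int.mod_eq_emod_of_pos (show (0:Int) < w by omega)]
      simp only [pvHB]
      split_ifs <;> ring
    rw [PySem.List.foldl_congr_mem _ _ _ 0 hpt, PySem.List.foldl_add]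
    simp [pvS]
  have hver : ∀ init : Int, List.foldl
      (fun (per : Int) (e : Int × Int) =>
        if e.1 = 1 ∧ e.2 = 0 ∨ e.1 = 0 ∧ e.2 = 1 then per + 1 else per) init
      ((List.range (b.length - w.toNat)).map (fun j => (b.getD j 0, b.getD (j + w.toNat) 0)))
      = init + pvS (b.length - w.toNat) (pvVB b w.toNat) := by
    intro init
    rw [List.foldl_map]
    have hpt : ∀ (acc : Int), ∀ k ∈ List.range (b.length - w.toNat),
        (if b.getD k 0 = 1 ∧ b.getD (k + w.toNat) 0 = 0 ∨ b.getD k 0 = 0 ∧ b.getD (k + w.toNat) 0 = 1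
         then acc + 1 else acc) = acc + pvVB b w.toNat k := by
      intro acc k _
      simp only [pvVB]
      split_ifs <;> ring
    rw [PySem.List.foldl_congr_mem _ _ _ init hpt, PySem.List.foldl_add]
    rfl
  have h0 : find_perimeter_area_alt b w =
      ((b.zip (PySem.List.slice b (some w) none)).foldl
          (fun per e => if (e.1 = 1 ∧ e.2 = 0) ∨ (e.1 = 0 ∧ e.2 = 1) then per + 1 else per)
          ((PySem.List.enumerate (b.zip (PySem.List.slice b (some 1) none))).foldl
            (fun per e =>
              if PySem.Int.mod (e.1 + 1) w ≠ 0 ∧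
                 ((e.2.1 = 1 ∧ e.2.2 = 0) ∨ (e.2.1 = 0 ∧ e.2.2 = 1)) then per + 1 else per) 0),
       b.foldl (fun a p => if p = 1 then a + 1 else a) 0) := rfl
  rw [h0, PySem.List.slice_from_one, ← List.drop_one, pv_zip_drop b 1,
      PySem.List.slice_from b (show (0:Int) ≤ w by omega), pv_zip_drop b w.toNat,
      pv_enum_map_range]
  simp only [harea, hhor, hver]

theorem pv_area_eq (b : List Int) :
    pvS b.length (pvGA b) = (b.map (fun p => if p = 1 then (1 : Int) else 0)).sum := by
  induction b with
  | nil => rfl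
  | cons x t ih =>
    simp only [List.length_cons, List.map_cons, List.sum_cons]
    rw [pvS_succ_left]
    have h0 : pvGA (x :: t) 0 = if x = 1 then (1 : Int) else 0 := by
      simp [pvGA]
    have hs : ∀ k : Nat, pvGA (x :: t) (k + 1) = pvGA t k := by
      intro k
      simp [pvGA, PySem.List.pyGet?_natCast]
    rw [h0, pvS_congr _ _ (pvGA t) (fun k _ => hs k), ih]

def pvFL (b : List Int) (w : Int) (k : Nat) : Int :=
  if PySem.List.pyGet? b (k : Int) = some 1 ∧ ((k : Int) % w ≠ 0 ∧ PySem.List.pyGet? b ((k : Int) - 1) = some 0) then 1 else 0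
def pvFR (b : List Int) (w : Int) (k : Nat) : Int :=
  if PySem.List.pyGet? b (k : Int) = some 1 ∧ (((k : Int) + 1) % w ≠ 0 ∧ PySem.List.pyGet? b ((k : Int) + 1) = some 0) then 1 else 0
def pvFU (b : List Int) (w : Int) (k : Nat) : Int :=
  if PySem.List.pyGet? b (k : Int) = some 1 ∧ (w ≤ (k : Int) ∧ PySem.List.pyGet? b ((k : Int) - w) = some 0) then 1 else 0
def pvFD (b : List Int) (w : Int) (k : Nat) : Int :=
  if PySem.List.pyGet? b (k : Int) = some 1 ∧ ((k : Int) + w < (b.length : Int) ∧ PySem.List.pyGet? b ((k : Int) + w) = some 0) then 1 else 0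

def pvQL (b : List Int) (w : Int) (j : Nat) : Int :=
  if b.getD (j + 1) 0 = 1 ∧ (((j : Int) + 1) % w ≠ 0 ∧ b.getD j 0 = 0) then 1 else 0
def pvQR (b : List Int) (w : Int) (j : Nat) : Int :=
  if b.getD j 0 = 1 ∧ (((j : Int) + 1) % w ≠ 0 ∧ b.getD (j + 1) 0 = 0) then 1 else 0
def pvQU (b : List Int) (wn : Nat) (j : Nat) : Int :=
  if b.getD (j + wn) 0 = 1 ∧ b.getD j 0 = 0 then 1 else 0
def pvQD (b : List Int) (wn : Nat) (j : Nat) : Int :=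
  if b.getD j 0 = 1 ∧ b.getD (j + wn) 0 = 0 then 1 else 0

theorem pv_get_eq (b : List Int) (i : Int) (k : Nat) (hik : i = (k : Int)) (hk : k < b.length) (v : Int) :
    (PySem.List.pyGet? b i = some v) ↔ b.getD k 0 = v := by
  subst hik
  rw [PySem.List.pyGet?_natCast, List.getElem?_eq_getElem hk, List.getD_eq_getElem b 0 hk, Option.some.injEq]

theorem pv_get_none (b : List Int) (i : Int) (k : Nat) (hik : i = (k : Int)) (hk : b.length ≤ k) :
    PySem.List.pyGet? b i = none := by
  subst hik
  rw [PySem.List.pyGet?_natCast]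
  exact List.getElem?_eq_none hk

theorem pvFA_split (b : List Int) (w : Int) (hw : 1 ≤ w) (k : Nat) :
    pvFA b w k = pvFL b w k + (pvFR b w k + (pvFU b w k + pvFD b w k)) := by
  have hmod1 : PySem.Int.mod (k : Int) w = (k : Int) % w :=
    PySem.Int.mod_eq_emod_of_pos (by omega)
  have hmod2 : PySem.Int.mod ((k : Int) + 1) w = ((k : Int) + 1) % w :=
    PySem.Int.mod_eq_emod_of_pos (by omega)
  by_cases h1 : PySem.List.pyGet? b (k : Int) = some 1
  · simp only [pvFA, pvFL, pvFR, pvFU, pvFD, hmod1, hmod2, eq_true h1, true_and, if_true]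
    ring
  · simp only [pvFA, pvFL, pvFR, pvFU, pvFD, hmod1, hmod2, eq_false h1, false_and, if_false]
    ring

theorem pvLR (b : List Int) (w : Int) :
    pvS b.length (pvFR b w) = pvS (b.length - 1) (pvQR b w) := by
  cases hn : b.length with
  | zero => simp [pvS]
  | succ m =>
    rw [pvS_succ_right]
    have hnone : PySem.List.pyGet? b ((m : Int) + 1) = none :=
      pv_get_none b _ (m + 1) (by push_cast; ring) (by omega)
    have hlast : pvFR b w m = 0 := by simp [pvFR, hnone]
    have hcg : ∀ k, k < m → pvFR b w k = pvQR b w k := by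
      intro k hk
      simp only [pvFR, pvQR,
        pv_get_eq b (k : Int) k rfl (by omega) 1,
        pv_get_eq b ((k : Int) + 1) (k + 1) (by push_cast; ring) (by omega) 0]
    rw [pvS_congr m _ _ hcg, hlast]
    simp

theorem pvLL (b : List Int) (w : Int) :
    pvS b.length (pvFL b w) = pvS (b.length - 1) (pvQL b w) := by
  cases hn : b.length with
  | zero => simp [pvS]
  | succ m =>
    rw [pvS_succ_left]
    have h0 : pvFL b w 0 = 0 := by simp [pvFL]
    have hcg : ∀ j, j < m → pvFL b w (j + 1) = pvQL b w j := by
      intro j hj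
      simp only [pvFL, pvQL, Nat.cast_add, Nat.cast_one, add_sub_cancel_right,
        pv_get_eq b ((j : Int) + 1) (j + 1) (by push_cast; ring) (by omega) 1,
        pv_get_eq b (j : Int) j rfl (by omega) 0]
    rw [pvS_congr m _ _ hcg, h0]
    simp

theorem pvLU (b : List Int) (w : Int) (hw : 1 ≤ w) :
    pvS b.length (pvFU b w) = pvS (b.length - w.toNat) (pvQU b w.toNat) := by
  have hwn : ((w.toNat : Nat) : Int) = w := by omega
  by_cases hbig : b.length ≤ w.toNat
  · rw [show b.length - w.toNat = 0 by omega]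
    rw [pvS_zero_of_all b.length _ ?_]
    · simp [pvS]
    · intro k hk
      have hnle : ¬ (w ≤ (k : Int)) := by omega
      simp [pvFU, hnle]
  · rw [pvS_split w.toNat b.length (by omega)]
    rw [pvS_zero_of_all w.toNat _ ?_]
    · rw [pvS_congr (b.length - w.toNat) _ (pvQU b w.toNat) ?_]
      · ring
      · intro j hj
        have hle : (w ≤ ((w.toNat + j : Nat) : Int)) = True :=
          eq_true (by push_cast; omega)
        simp only [pvFU, pvQU, hle, true_and,
          pv_get_eq b ((w.toNat + j : Nat) : Int) (j + w.toNat) (by push_cast; ring) (by omega) 1,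
          pv_get_eq b (((w.toNat + j : Nat) : Int) - w) j (by omega) (by omega) 0]
    · intro k hk
      have hnle : ¬ (w ≤ (k : Int)) := by omega
      simp [pvFU, hnle]

theorem pvLD (b : List Int) (w : Int) (hw : 1 ≤ w) :
    pvS b.length (pvFD b w) = pvS (b.length - w.toNat) (pvQD b w.toNat) := by
  have hwn : ((w.toNat : Nat) : Int) = w := by omega
  rw [pvS_split (b.length - w.toNat) b.length (by omega)]
  rw [pvS_zero_of_all (b.length - (b.length - w.toNat)) _ ?_]
  · rw [pvS_congr (b.length - w.toNat) _ (pvQD b w.toNat) ?_]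
    · ring
    · intro j hj
      have hlt : ((j : Int) + w < (b.length : Int)) = True :=
        eq_true (by omega)
      simp only [pvFD, pvQD, hlt, true_and,
        pv_get_eq b (j : Int) j rfl (by omega) 1,
        pv_get_eq b ((j : Int) + w) (j + w.toNat) (by omega) (by omega) 0]
  · intro j hj
    simp [pvFD]
    intro _ h2
    exact absurd h2 (by omega)

theorem pvM1 (b : List Int) (w : Int) (j : Nat) :
    pvQL b w j + pvQR b w j = pvHB b w j := by
  rw [pvQL, pvQR, pvHB]
  split_ifs <;> simp_all <;> omega

theorem pvM2 (b : List Int) (wn : Nat) (j : Nat) :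
    pvQU b wn j + pvQD b wn j = pvVB b wn j := by
  rw [pvQU, pvQD, pvVB]
  split_ifs <;> simp_all <;> omega

theorem pvA_per_eq (b : List Int) (w : Int) (hw : 1 ≤ w) :
    pvS b.length (pvFA b w) =
      pvS (b.length - 1) (pvHB b w) + pvS (b.length - w.toNat) (pvVB b w.toNat) := by
  rw [pvS_congr b.length _ _ (fun k _ => pvFA_split b w hw k)]
  rw [pvS_add, pvS_add, pvS_add, pvLL b w, pvLR b w, pvLU b w hw, pvLD b w hw]
  have hUD : pvS (b.length - w.toNat) (pvQU b w.toNat) + pvS (b.length - w.toNat) (pvQD b w.toNat)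
      = pvS (b.length - w.toNat) (pvVB b w.toNat) := by
    rw [← pvS_add]
    exact pvS_congr _ _ _ (fun j _ => pvM2 b w.toNat j)
  have hLR2 : pvS (b.length - 1) (pvQL b w) + pvS (b.length - 1) (pvQR b w)
      = pvS (b.length - 1) (pvHB b w) := by
    rw [← pvS_add]
    exact pvS_congr _ _ _ (fun j _ => pvM1 b w j)
  rw [hUD, ← hLR2]
  ring

-- ===== VERDICT (by name: the statement is the Claim_ definition above) =====
theorem find_perimeter_area_spec : Claim_equal_find_perimeter_area := by
  intro binary_image width _ hpre
  obtain ⟨hw, -⟩ := hpre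
  show find_perimeter_area binary_image width = find_perimeter_area_alt binary_image width
  rw [pvA_eq, pvB_eq binary_image width hw, pv_area_eq, pvA_per_eq binary_image width hw]
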